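-- pv_equiv track=rewrite | github.com/DigitalHallucinations/forgewire-fabric | python/forgewire/hub/_router.py | scopes_within
-- ===== SOURCE A (Python) =====
-- from typing import Any, Mapping, Sequence
--
-- def glob_static_prefix(glob: str) -> str:
--     """Return the leading wildcard-free directory prefix of a glob."""
--     norm = glob.replace("\\", "/")
--     cut = len(norm)
--     for ch in ("*", "?", "["):
--         idx = norm.find(ch)
--         if idx != -1 and idx < cut:
--             cut = idx
--     head = norm[:cut]
--     if "/" in head:
--         head = head.rsplit("/", 1)[0] + "/"
--     else:
--         head = ""
--     return head
--
-- def scopes_within(task_globs: Sequence[str], runner_prefixes: Sequence[str]) -> bool: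
--     """True iff every task glob's static prefix overlaps some runner prefix."""
--     if not runner_prefixes:
--         return True
--     for glob in task_globs:
--         head = glob_static_prefix(glob)
--         if not any(head.startswith(p) or p.startswith(head) for p in runner_prefixes):
--             return False
--     return True
-- ===== SOURCE B (Python) =====
-- def glob_static_prefix(glob: str) -> str:
--     """Return the leading wildcard-free directory prefix of a glob."""
--     norm = glob.replace("\\", "/")
--     cut = len(norm)
--     for ch in ("*", "?", "["):
--         idx = norm.find(ch)
--         if idx != -1 and idx < cut:
--             cut = idx
--     head = norm[:cut]
--     if "/" in head:
--         head = head.rsplit("/", 1)[0] + "/"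
--     else:
--         head = ""
--     return head
--
-- def scopes_within(task_globs, runner_prefixes):
--     """Hash-indexed: a set of all runner-prefix prefixes replaces the inner scan,
--     and duplicate globs/prefixes are collapsed up front (the result is an
--     order-independent conjunction, so set iteration is safe)."""
--     if not runner_prefixes:
--         return True
--     exact = set(runner_prefixes)
--     extended = set()
--     for p in exact:
--         for k in range(len(p) + 1):
--             extended.add(p[:k])
--     return all(
--         head in extended or any(head[:k] in exact for k in range(len(head)))
--         for head in map(glob_static_prefix, set(task_globs))
--     )
-- ===== Notes on version B (the rewrite author's own statement) =====
-- stated objective: faster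
-- what changed: B deduplicates globs and runner prefixes into sets and precomputes one hash set of all prefixes of the runner prefixes, so each distinct glob head is checked by O(L) set lookups instead of A's scan over every runner prefix.
import Mathlib
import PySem

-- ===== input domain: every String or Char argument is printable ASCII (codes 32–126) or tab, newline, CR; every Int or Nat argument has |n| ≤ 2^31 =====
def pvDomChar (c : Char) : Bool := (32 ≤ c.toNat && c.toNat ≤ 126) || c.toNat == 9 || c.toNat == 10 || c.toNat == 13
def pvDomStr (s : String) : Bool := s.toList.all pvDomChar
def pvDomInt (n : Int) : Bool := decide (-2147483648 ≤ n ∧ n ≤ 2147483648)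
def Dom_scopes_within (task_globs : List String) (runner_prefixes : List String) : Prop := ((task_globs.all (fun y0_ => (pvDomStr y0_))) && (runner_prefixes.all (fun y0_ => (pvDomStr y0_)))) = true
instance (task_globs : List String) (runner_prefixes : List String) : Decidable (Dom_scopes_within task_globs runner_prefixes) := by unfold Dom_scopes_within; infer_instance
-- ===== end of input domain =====

-- B replaces A's inner scan over runner_prefixes with a hash set of all runner-prefix
-- prefixes built once (objective: faster — the per-glob check no longer scans the runners).

-- ===== PORT A =====
-- glob_static_prefix, shared verbatim by Source A and Source B (both ports call it).
-- head.rsplit("/", 1)[0] + "/" (reached only when "/" in head) is ported exactly as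
-- head[:head.rfind("/")] ++ "/".
def globHead (glob : String) : List Char :=
  let norm := PySem.Chars.replace glob.toList ['\\'] ['/']
  let cut := [('*' : Char), '?', '['].foldl (fun cut ch =>
      let idx := PySem.Chars.find norm [ch]
      if idx ≠ -1 ∧ idx < cut then idx else cut) ((norm.length : Int))
  let head := PySem.Chars.slice norm none (some cut)
  if PySem.Chars.isIn ['/'] head then
    PySem.Chars.slice head none (some (PySem.Chars.rfind head ['/'])) ++ ['/']
  else []

def scopes_within (task_globs : List String) (runner_prefixes : List String) : Bool :=
  if runner_prefixes = [] then true
  else task_globs.foldl (fun ok glob =>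
    let head := globHead glob
    if !(runner_prefixes.any fun p =>
        PySem.Chars.startswith head p.toList || PySem.Chars.startswith p.toList head)
    then false else ok) true

-- ===== PORT B =====
-- exact = set(runner_prefixes)
def exactSet (runner_prefixes : List String) : PySem.Set (List Char) :=
  PySem.Set.ofList (runner_prefixes.map String.toList)

-- extended = { p[:k] | p in exact, 0 <= k <= len(p) }  (built by iterating the set;
-- only membership in it is used afterwards, so iteration order is immaterial)
def extendedSet (runner_prefixes : List String) : PySem.Set (List Char) :=
  (exactSet runner_prefixes).foldl (fun s p =>
    (PySem.List.pyRange 0 ((p.length : Int) + 1)).foldl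
      (fun s k => PySem.Set.add s (PySem.Chars.slice p none (some k))) s)
    PySem.Set.empty

-- all(... for head in map(glob_static_prefix, set(task_globs))): an order-independent
-- conjunction over the set's elements, ported over the Set's list of distinct elements
def scopes_within_alt (task_globs : List String) (runner_prefixes : List String) : Bool :=
  if runner_prefixes = [] then true
  else
    let exact := exactSet runner_prefixes
    let extended := extendedSet runner_prefixes
    ((PySem.Set.ofList task_globs).map globHead).all (fun head =>
      PySem.Set.contains extended head ||
      (PySem.List.pyRange 0 ((head.length : Int))).any
        (fun k => PySem.Set.contains exact (PySem.Chars.slice head none (some k))))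

-- ===== PRECONDITION & SPEC =====
def Spec_scopes_within (task_globs : List String) (runner_prefixes : List String) (out : Bool) : Prop := out = scopes_within_alt task_globs runner_prefixes
instance (task_globs : List String) (runner_prefixes : List String) (out : Bool) : Decidable (Spec_scopes_within task_globs runner_prefixes out) := by unfold Spec_scopes_within; infer_instance

-- ===== CLAIM (what is proved, stated in full; the proofs are below) =====
def Claim_equal_scopes_within : Prop := ∀ (task_globs : List String) (runner_prefixes : List String), Dom_scopes_within task_globs runner_prefixes → Spec_scopes_within task_globs runner_prefixes (scopes_within task_globs runner_prefixes)

-- ===== LEMMAS AND PROOFS =====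

-- membership in a fold that adds g k for each k of a list
theorem mem_foldl_add_set {α β : Type} [BEq α] [LawfulBEq α] (l : List β) (g : β → α)
    (s : PySem.Set α) (x : α) :
    x ∈ l.foldl (fun s k => PySem.Set.add s (g k)) s ↔ x ∈ s ∨ ∃ k ∈ l, x = g k := by
  induction l generalizing s with
  | nil => simp
  | cons b t ih =>
      simp only [List.foldl_cons, ih, PySem.Set.mem_add, List.mem_cons]
      constructor
      · rintro (((h | h) | ⟨k, hk, rfl⟩))
        · exact Or.inl h
        · exact Or.inr ⟨b, Or.inl rfl, h⟩
        · exact Or.inr ⟨k, Or.inr hk, rfl⟩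
      · rintro (h | ⟨k, (rfl | hk), rfl⟩)
        · exact Or.inl (Or.inl h)
        · exact Or.inl (Or.inr rfl)
        · exact Or.inr ⟨k, hk, rfl⟩

-- for one p, the inner loop adds exactly the prefixes of p
theorem mem_prefixFold (p : List Char) (s : PySem.Set (List Char)) (x : List Char) :
    x ∈ (PySem.List.pyRange 0 ((p.length : Int) + 1)).foldl
      (fun s k => PySem.Set.add s (PySem.Chars.slice p none (some k))) s
    ↔ x ∈ s ∨ x <+: p := by
  rw [mem_foldl_add_set]
  apply or_congr Iff.rfl
  constructor
  · rintro ⟨k, hk, rfl⟩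
    rw [PySem.List.mem_pyRange_one] at hk
    simp only [PySem.Chars.slice, PySem.List.slice_to _ hk.1]
    exact List.take_prefix _ _
  · intro h
    refine ⟨(x.length : Int), ?_, ?_⟩
    · rw [PySem.List.mem_pyRange_one]
      have := h.length_le
      omega
    · simp only [PySem.Chars.slice, PySem.List.slice_to _ (Int.natCast_nonneg x.length)]
      simpa using List.prefix_iff_eq_take.mp h

theorem mem_extendedSet (rp : List String) (x : List Char) :
    x ∈ extendedSet rp ↔ ∃ p ∈ rp, x <+: p.toList := by
  unfold extendedSet
  have main : ∀ (l : List (List Char)) (s : PySem.Set (List Char)),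
      x ∈ l.foldl (fun s p =>
        (PySem.List.pyRange 0 ((p.length : Int) + 1)).foldl
          (fun s k => PySem.Set.add s (PySem.Chars.slice p none (some k))) s) s
      ↔ x ∈ s ∨ ∃ p ∈ l, x <+: p := by
    intro l
    induction l with
    | nil => simp
    | cons q t ih =>
        intro s
        simp only [List.foldl_cons, ih, mem_prefixFold, List.mem_cons]
        constructor
        · rintro ((h | h) | ⟨p, hp, hx⟩)
          · exact Or.inl h
          · exact Or.inr ⟨q, Or.inl rfl, h⟩
          · exact Or.inr ⟨p, Or.inr hp, hx⟩
        · rintro (h | ⟨p, (rfl | hp), hx⟩)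
          · exact Or.inl (Or.inl h)
          · exact Or.inl (Or.inr hx)
          · exact Or.inr ⟨p, hp, hx⟩
  rw [main]
  simp only [PySem.Set.empty, List.not_mem_nil, false_or, exactSet, PySem.Set.mem_ofList,
    List.mem_map]
  constructor
  · rintro ⟨p, ⟨q, hq, rfl⟩, hx⟩
    exact ⟨q, hq, hx⟩
  · rintro ⟨q, hq, hx⟩
    exact ⟨q.toList, ⟨q, hq, rfl⟩, hx⟩

-- per-glob: A's scan over runner_prefixes equals B's two set tests
theorem headCond_eq (head : List Char) (rp : List String) :
    (rp.any fun p =>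
        PySem.Chars.startswith head p.toList || PySem.Chars.startswith p.toList head)
    = (PySem.Set.contains (extendedSet rp) head ||
       (PySem.List.pyRange 0 ((head.length : Int))).any
          (fun k => PySem.Set.contains (exactSet rp) (PySem.Chars.slice head none (some k)))) := by
  rw [Bool.eq_iff_iff]
  simp only [List.any_eq_true, Bool.or_eq_true]
  constructor
  · rintro ⟨p, hp, h | h⟩
    · -- head.startswith(p): p.toList <+: head
      have hpre := (PySem.Chars.startswith_iff _ _).mp h
      by_cases he : p.toList = head
      · exact Or.inl ((PySem.Set.contains_iff _ _).mpr
          ((mem_extendedSet rp head).mpr ⟨p, hp, he ▸ List.prefix_refl _⟩))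
      · refine Or.inr ⟨(p.toList.length : Int), ?_⟩
        have hlt : p.toList.length < head.length := by
          rcases Nat.lt_or_ge p.toList.length head.length with h1 | h1
          · exact h1
          · exact absurd (List.IsPrefix.eq_of_length_le hpre (by omega)) he
        refine ⟨PySem.List.mem_pyRange_one.mpr (by omega), ?_⟩
        rw [PySem.Chars.slice, PySem.List.slice_to _ (Int.natCast_nonneg p.toList.length)]
        apply (PySem.Set.contains_iff _ _).mpr
        rw [exactSet, PySem.Set.mem_ofList, List.mem_map]
        exact ⟨p, hp, by simpa using List.prefix_iff_eq_take.mp hpre⟩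
    · -- p.startswith(head): head <+: p.toList
      exact Or.inl ((PySem.Set.contains_iff _ _).mpr
        ((mem_extendedSet rp head).mpr ⟨p, hp, (PySem.Chars.startswith_iff _ _).mp h⟩))
  · rintro (h | ⟨k, hk, h⟩)
    · rcases (mem_extendedSet rp head).mp ((PySem.Set.contains_iff _ _).mp h) with ⟨p, hp, hx⟩
      exact ⟨p, hp, Or.inr ((PySem.Chars.startswith_iff _ _).mpr hx)⟩
    · have hk0 := PySem.List.mem_pyRange_one.mp hk
      rw [PySem.Chars.slice, PySem.List.slice_to _ hk0.1] at h
      have hmem := (PySem.Set.contains_iff _ _).mp h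
      rw [exactSet, PySem.Set.mem_ofList, List.mem_map] at hmem
      rcases hmem with ⟨p, hp, hpe⟩
      refine ⟨p, hp, Or.inl ((PySem.Chars.startswith_iff _ _).mpr ?_)⟩
      rw [hpe]
      exact List.take_prefix _ _

-- ===== VERDICT (by name: the statement is the Claim_ definition above) =====
theorem scopes_within_spec : Claim_equal_scopes_within := by
  intro task_globs runner_prefixes _
  unfold Spec_scopes_within scopes_within scopes_within_alt
  by_cases h : runner_prefixes = []
  · simp [h]
  · simp only [h, if_false]
    rw [Bool.eq_iff_iff]
    rw [PySem.List.foldl_if_false_eq (p := fun glob =>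
      !(runner_prefixes.any fun p =>
        PySem.Chars.startswith (globHead glob) p.toList ||
        PySem.Chars.startswith p.toList (globHead glob)))]
    simp only [Bool.true_and, Bool.not_eq_true', List.any_eq_false,
      List.all_map, List.all_eq_true, PySem.Set.mem_ofList]
    apply forall_congr'
    intro glob
    apply imp_congr Iff.rfl
    rw [Function.comp_apply, ← headCond_eq (globHead glob) runner_prefixes]
    simp only [List.any_eq_true, Bool.or_eq_true, not_forall, not_not]
    exact exists_congr fun x => exists_prop
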